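-- pv_equiv track=rewrite | github.com/decocereus/Building-Feature-Vectors-from-PROV-Templates | Script.py | formatFingerPrint
-- ===== SOURCE A (Python) =====
-- SHORT_NAMES = {
--     'entity': 'ent',
--     'activity': 'act',
--     'agent': 'agt',
--     'wasDerivedFrom': 'der',
--     'used': 'usd',
--     'wasInformedBy': 'wib',
--     "wasGeneratedBy": 'gen',
--     'wasAttributedTo': 'att',
--     'wasAssociatedWith': 'waw',
--     'actedOnBehalfOf': 'del',
--     'wasInformedBy': 'wib',
--     'wasStartedBy': 'wsb',
--     'wasEndedBy': 'web',
--     'wasInvalidatedBy': 'inv',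
--     'wasInfluencedBy': 'inf',
--     'alternateOf': 'alt',
--     'specializationOf': 'spe',
--     'hadMember': 'mem',
--     'mentionOf': 'men'
-- }
--
-- def formatFingerPrint(f):
--     try:
--         types = sorted(SHORT_NAMES[qn] for qn in f)
--     except KeyError:
--         types = sorted(SHORT_NAMES[qn] for qn in f if qn in SHORT_NAMES)
--         additionalTypes = sorted([qn for qn in f if qn not in SHORT_NAMES])
--         types.extend(additionalTypes)
--     return '[' + '|'.join(str(t) for t in types) + ']'
-- ===== SOURCE B (Python) =====
-- SHORT_NAMES = {
--     'entity': 'ent',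
--     'activity': 'act',
--     'agent': 'agt',
--     'wasDerivedFrom': 'der',
--     'used': 'usd',
--     'wasInformedBy': 'wib',
--     "wasGeneratedBy": 'gen',
--     'wasAttributedTo': 'att',
--     'wasAssociatedWith': 'waw',
--     'actedOnBehalfOf': 'del',
--     'wasInformedBy': 'wib',
--     'wasStartedBy': 'wsb',
--     'wasEndedBy': 'web',
--     'wasInvalidatedBy': 'inv',
--     'wasInfluencedBy': 'inf',
--     'alternateOf': 'alt',
--     'specializationOf': 'spe',
--     'hadMember': 'mem',
--     'mentionOf': 'men'
-- }
--
--
-- def formatFingerPrint(f):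
--     # one sort over the raw keys with a composite string key: known names sort
--     # under the '0' tag by their short form, unknown names under the '1' tag
--     # by themselves, so the known group (sorted by short name) precedes the
--     # sorted unknown group; then one mapping pass produces the parts.
--     def key(qn):
--         return '0' + SHORT_NAMES[qn] if qn in SHORT_NAMES else '1' + qn
--     parts = [SHORT_NAMES.get(qn, qn) for qn in sorted(f, key=key)]
--     return '[' + '|'.join(parts) + ']'
-- ===== Notes on version B (the rewrite author's own statement) =====
-- stated objective: alternative
-- what changed: Replaces A's optimistic sort of mapped short names with a KeyError-triggered fallback of two sorts over two re-scans of f by a single composite-key sort over the raw keys ('0'+short for known, '1'+qn for unknown) followed by one mapping pass.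
import Mathlib
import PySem

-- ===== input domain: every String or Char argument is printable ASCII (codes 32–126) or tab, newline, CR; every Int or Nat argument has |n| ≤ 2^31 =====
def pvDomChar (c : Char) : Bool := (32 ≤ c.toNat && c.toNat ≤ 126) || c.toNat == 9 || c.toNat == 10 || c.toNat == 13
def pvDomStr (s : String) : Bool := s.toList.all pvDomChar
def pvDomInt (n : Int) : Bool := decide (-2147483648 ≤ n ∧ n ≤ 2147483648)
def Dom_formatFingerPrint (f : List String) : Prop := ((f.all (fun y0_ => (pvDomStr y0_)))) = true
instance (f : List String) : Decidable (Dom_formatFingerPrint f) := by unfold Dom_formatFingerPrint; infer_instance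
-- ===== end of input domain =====

-- B replaces A's optimistic-sort/KeyError-fallback (two sorts plus re-scans of f) with ONE
-- composite-key sort over the raw keys followed by a mapping pass (objective: alternative).

-- ===== PORT A =====
-- the module-level SHORT_NAMES dict literal (the duplicate 'wasInformedBy' entry kept, as in the source)
def pvShortNames : PySem.Dict String String :=
  PySem.Dict.ofList [("entity","ent"),("activity","act"),("agent","agt"),("wasDerivedFrom","der"),
    ("used","usd"),("wasInformedBy","wib"),("wasGeneratedBy","gen"),("wasAttributedTo","att"),
    ("wasAssociatedWith","waw"),("actedOnBehalfOf","del"),("wasInformedBy","wib"),("wasStartedBy","wsb"),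
    ("wasEndedBy","web"),("wasInvalidatedBy","inv"),("wasInfluencedBy","inf"),("alternateOf","alt"),
    ("specializationOf","spe"),("hadMember","mem"),("mentionOf","men")]

-- the try body succeeds iff every qn is a key (KeyError otherwise, caught by the except);
-- under that guard SHORT_NAMES[qn] is getD … "" (exact: the key is present)
def formatFingerPrint (f : List String) : String :=
  if f.all (fun qn => PySem.Dict.contains pvShortNames qn) then
    "[" ++ PySem.Str.join "|" (PySem.List.sorted
        (f.map (fun qn => PySem.Dict.getD pvShortNames qn "")) (fun t => t) false) ++ "]"
  else
    let types := PySem.List.sorted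
        ((f.filter (fun qn => PySem.Dict.contains pvShortNames qn)).map
          (fun qn => PySem.Dict.getD pvShortNames qn "")) (fun t => t) false
    let additionalTypes := PySem.List.sorted
        (f.filter (fun qn => ! PySem.Dict.contains pvShortNames qn)) (fun t => t) false
    "[" ++ PySem.Str.join "|" (types ++ additionalTypes) ++ "]"

-- ===== PORT B =====
-- key(qn) = '0' + SHORT_NAMES[qn] if qn in SHORT_NAMES else '1' + qn
def pvKey (qn : String) : String :=
  if PySem.Dict.contains pvShortNames qn then "0" ++ PySem.Dict.getD pvShortNames qn "" else "1" ++ qn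

-- SHORT_NAMES.get(qn, qn)
def pvPart (qn : String) : String := PySem.Dict.getD pvShortNames qn qn

def formatFingerPrint_alt (f : List String) : String :=
  "[" ++ PySem.Str.join "|" ((PySem.List.sorted f pvKey false).map pvPart) ++ "]"

-- ===== PRECONDITION & SPEC =====
def Spec_formatFingerPrint (f : List String) (out : String) : Prop := out = formatFingerPrint_alt f
instance (f : List String) (out : String) : Decidable (Spec_formatFingerPrint f out) := by unfold Spec_formatFingerPrint; infer_instance

-- ===== CLAIM (what is proved, stated in full; the proofs are below) =====
def Claim_equal_formatFingerPrint : Prop := ∀ (f : List String), Dom_formatFingerPrint f → Spec_formatFingerPrint f (formatFingerPrint f)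

-- ===== LEMMAS AND PROOFS =====

-- the dict literal with its duplicate key resolved (first position, last value — here equal values)
theorem pvShortNames_eq : pvShortNames = PySem.Dict.mk [("entity","ent"),("activity","act"),
    ("agent","agt"),("wasDerivedFrom","der"),("used","usd"),("wasInformedBy","wib"),
    ("wasGeneratedBy","gen"),("wasAttributedTo","att"),("wasAssociatedWith","waw"),
    ("actedOnBehalfOf","del"),("wasStartedBy","wsb"),("wasEndedBy","web"),("wasInvalidatedBy","inv"),
    ("wasInfluencedBy","inf"),("alternateOf","alt"),("specializationOf","spe"),("hadMember","mem"),
    ("mentionOf","men")] := by decide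

-- the inverse of the (value-injective) dict, used only by the proofs
def pvInv (s : String) : String :=
  if s = "ent" then "entity" else if s = "act" then "activity" else if s = "agt" then "agent"
  else if s = "der" then "wasDerivedFrom" else if s = "usd" then "used"
  else if s = "wib" then "wasInformedBy" else if s = "gen" then "wasGeneratedBy"
  else if s = "att" then "wasAttributedTo" else if s = "waw" then "wasAssociatedWith"
  else if s = "del" then "actedOnBehalfOf" else if s = "wsb" then "wasStartedBy"
  else if s = "web" then "wasEndedBy" else if s = "inv" then "wasInvalidatedBy"
  else if s = "inf" then "wasInfluencedBy" else if s = "alt" then "alternateOf"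
  else if s = "spe" then "specializationOf" else if s = "mem" then "hadMember"
  else if s = "men" then "mentionOf" else ""

theorem pv_get?_inv (a s : String) (h : PySem.Dict.get? pvShortNames a = some s) : a = pvInv s := by
  rw [pvShortNames_eq] at h
  have h1 := PySem.Dict.mem_items_of_get?_eq_some _ h
  simp only [List.mem_cons, List.not_mem_nil, or_false, Prod.mk.injEq] at h1
  rcases h1 with ⟨rfl,rfl⟩|⟨rfl,rfl⟩|⟨rfl,rfl⟩|⟨rfl,rfl⟩|⟨rfl,rfl⟩|⟨rfl,rfl⟩|⟨rfl,rfl⟩|⟨rfl,rfl⟩|⟨rfl,rfl⟩|⟨rfl,rfl⟩|⟨rfl,rfl⟩|⟨rfl,rfl⟩|⟨rfl,rfl⟩|⟨rfl,rfl⟩|⟨rfl,rfl⟩|⟨rfl,rfl⟩|⟨rfl,rfl⟩|⟨rfl,rfl⟩ <;> decide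

theorem pvKey_inj : Function.Injective pvKey := by
  intro a b h
  unfold pvKey at h
  rcases ha : PySem.Dict.get? pvShortNames a with _ | va <;>
    rcases hb : PySem.Dict.get? pvShortNames b with _ | vb <;>
      rw [PySem.Dict.contains_eq_isSome_get?, PySem.Dict.contains_eq_isSome_get?, ha, hb] at h <;>
        simp only [Option.isSome_none, Option.isSome_some, if_true, if_false, Bool.false_eq_true,
          PySem.Dict.getD_eq_get?_getD, ha, hb, Option.getD_some] at h
  · exact (String.append_right_inj "1").mp h
  · exact absurd (congrArg (fun t => t.toList.head?) h) (by simp)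
  · exact absurd (congrArg (fun t => t.toList.head?) h) (by simp)
  · have hv : va = vb := (String.append_right_inj "0").mp h
    rw [pv_get?_inv a va ha, pv_get?_inv b vb hb, hv]

-- lexicographic order on strings: an equal one-character prefix reflects ≤
theorem pv_append_le (s x y : String) (c : Char) (hs : s.toList = [c]) (h : s ++ x ≤ s ++ y) : x ≤ y := by
  rw [String.le_iff_toList_le, String.toList_append, String.toList_append, hs] at h
  rw [String.le_iff_toList_le]
  simp only [List.cons_append, List.nil_append] at h
  rcases lt_or_eq_of_le h with h' | h'
  · have h'' : List.Lex (· < ·) (c :: x.toList) (c :: y.toList) := List.lex_lt.mpr h'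
    cases h'' with
    | cons hr => exact le_of_lt (List.lex_lt.mp hr)
    | rel hcc => exact absurd hcc (lt_irrefl c)
  · simp_all

theorem pv_zero_lt_one (x y : String) : ("0" ++ x : String) < ("1" ++ y) := by
  rw [String.lt_iff_toList_lt, String.toList_append, String.toList_append]
  exact List.Lex.rel (by decide)

theorem pvKey_of_contains (qn : String) (h : PySem.Dict.contains pvShortNames qn = true) :
    pvKey qn = "0" ++ PySem.Dict.getD pvShortNames qn "" := by simp [pvKey, h]

theorem pvKey_of_not_contains (qn : String) (h : PySem.Dict.contains pvShortNames qn = false) :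
    pvKey qn = "1" ++ qn := by simp [pvKey, h]

theorem pvPart_of_not_contains (qn : String) (h : PySem.Dict.contains pvShortNames qn = false) :
    pvPart qn = qn := PySem.Dict.getD_of_not_contains _ _ h

theorem pvPart_of_contains (qn : String) (h : PySem.Dict.contains pvShortNames qn = true) :
    pvPart qn = PySem.Dict.getD pvShortNames qn "" := by
  rcases hg : PySem.Dict.get? pvShortNames qn with _ | v
  · rw [PySem.Dict.contains_eq_isSome_get?, hg] at h; simp at h
  · unfold pvPart
    rw [PySem.Dict.getD_of_get?_eq_some _ _ hg, PySem.Dict.getD_of_get?_eq_some _ _ hg]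

-- the single composite-key sort followed by the mapping pass yields exactly
-- A's fallback shape: sorted short names of the known keys ++ sorted unknown keys
theorem pv_main (f : List String) :
    (PySem.List.sorted f pvKey false).map pvPart
      = PySem.List.sorted ((f.filter (fun qn => PySem.Dict.contains pvShortNames qn)).map
            (fun qn => PySem.Dict.getD pvShortNames qn "")) (fun t => t) false
        ++ PySem.List.sorted (f.filter (fun qn => ! PySem.Dict.contains pvShortNames qn)) (fun t => t) false := by
  have hK := PySem.List.sorted_perm (f.filter (fun qn => PySem.Dict.contains pvShortNames qn)) pvKey false
  have hU := PySem.List.sorted_perm (f.filter (fun qn => ! PySem.Dict.contains pvShortNames qn)) pvKey false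
  have hKm : ∀ a ∈ PySem.List.sorted (f.filter (fun qn => PySem.Dict.contains pvShortNames qn)) pvKey false,
      PySem.Dict.contains pvShortNames a = true := by
    intro a ha
    exact (List.mem_filter.mp ((PySem.List.mem_sorted _ _ _ _).mp ha)).2
  have hUm : ∀ a ∈ PySem.List.sorted (f.filter (fun qn => ! PySem.Dict.contains pvShortNames qn)) pvKey false,
      PySem.Dict.contains pvShortNames a = false := by
    intro a ha
    simpa using (List.mem_filter.mp ((PySem.List.mem_sorted _ _ _ _).mp ha)).2
  have hsplit : PySem.List.sorted f pvKey false
      = PySem.List.sorted (f.filter (fun qn => PySem.Dict.contains pvShortNames qn)) pvKey false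
        ++ PySem.List.sorted (f.filter (fun qn => ! PySem.Dict.contains pvShortNames qn)) pvKey false := by
    have hperm : f.Perm (PySem.List.sorted (f.filter (fun qn => PySem.Dict.contains pvShortNames qn)) pvKey false
        ++ PySem.List.sorted (f.filter (fun qn => ! PySem.Dict.contains pvShortNames qn)) pvKey false) :=
      ((List.filter_append_perm _ f).symm).trans ((hK.append hU).symm)
    rw [PySem.List.sorted_eq_sorted_of_perm f _ pvKey pvKey_inj hperm]
    apply PySem.List.sorted_eq_self_of_pairwise
    rw [List.pairwise_append]
    refine ⟨PySem.List.sorted_pairwise _ _, PySem.List.sorted_pairwise _ _, ?_⟩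
    intro a ha b hb
    rw [pvKey_of_contains a (hKm a ha), pvKey_of_not_contains b (hUm b hb)]
    exact le_of_lt (pv_zero_lt_one _ _)
  rw [hsplit, List.map_append]
  congr 1
  · refine (PySem.List.sorted_id_eq_of_perm_of_pairwise _ _ ?_ ?_).symm
    · have h1 := hK.map pvPart
      have h2 : (f.filter (fun qn => PySem.Dict.contains pvShortNames qn)).map pvPart
          = (f.filter (fun qn => PySem.Dict.contains pvShortNames qn)).map
              (fun qn => PySem.Dict.getD pvShortNames qn "") :=
        List.map_eq_map_iff.mpr (fun a ha => pvPart_of_contains a (List.mem_filter.mp ha).2)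
      exact h2 ▸ h1
    · rw [List.pairwise_map]
      refine List.Pairwise.imp_of_mem ?_ (PySem.List.sorted_pairwise _ pvKey)
      intro a b ha hb hab
      rw [pvKey_of_contains a (hKm a ha), pvKey_of_contains b (hKm b hb)] at hab
      rw [pvPart_of_contains a (hKm a ha), pvPart_of_contains b (hKm b hb)]
      exact pv_append_le "0" _ _ '0' rfl hab
  · have hid : (PySem.List.sorted (f.filter (fun qn => ! PySem.Dict.contains pvShortNames qn)) pvKey false).map pvPart
        = PySem.List.sorted (f.filter (fun qn => ! PySem.Dict.contains pvShortNames qn)) pvKey false := by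
      rw [List.map_eq_map_iff.mpr (fun a ha => pvPart_of_not_contains a (hUm a ha)), List.map_id']
    rw [hid]
    refine (PySem.List.sorted_id_eq_of_perm_of_pairwise _ _ hU ?_).symm
    refine List.Pairwise.imp_of_mem ?_ (PySem.List.sorted_pairwise _ pvKey)
    intro a b ha hb hab
    rw [pvKey_of_not_contains a (hUm a ha), pvKey_of_not_contains b (hUm b hb)] at hab
    exact pv_append_le "1" _ _ '1' rfl hab

-- ===== VERDICT (by name: the statement is the Claim_ definition above) =====
theorem formatFingerPrint_spec : Claim_equal_formatFingerPrint := by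
  intro f _
  unfold Spec_formatFingerPrint formatFingerPrint formatFingerPrint_alt
  rw [pv_main f]
  split
  · next hall =>
    rw [List.filter_eq_self.mpr (by simpa [List.all_eq_true] using hall),
        List.filter_eq_nil_iff.mpr (by intro a ha; simpa using (List.all_eq_true.mp hall a ha)),
        (PySem.List.sorted_eq_nil_iff _ _ _).mpr rfl, List.append_nil]
  · rfl
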